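-- pv_equiv track=rewrite | github.com/glipR/MuMonash | IEEEXtreme14/palindrome/solution.py | centre_palindromes
-- ===== SOURCE A (Python) =====
-- def centre_palindromes(string):
--     if len(string) == 0:
--         return []
--     s2 = ["|"]*(2*len(string)+1)
--     for x in range(len(string)):
--         s2[2*x+1] = string[x]
--     p = [0] * len(s2)
--     c, r, m, n = 0, 0, 0, 0
--     for i in range(1, len(s2)):
--         if (i>r):
--             p[i] = 0
--             m = i-1
--             n = i+1
--         else:
--             i2 = c*2-i
--             if p[i2]<r-1-i:
--                 p[i] = p[i2]
--                 m = -1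
--             else:
--                 p[i] = r-i
--                 n = r+1
--                 m = i*2-n
--         while m>=0 and n<len(s2) and s2[m] == s2[n]:
--             p[i] += 1
--             m -= 1
--             n += 1
--         if i+p[i] > r:
--             c = i
--             r = i+p[i]
--     return p
-- ===== SOURCE B (Python) =====
-- def centre_palindromes(string):
--     if len(string) == 0:
--         return []
--     s2 = ["|"]
--     for ch in string:
--         s2.append(ch)
--         s2.append("|")
--     p = []
--     for i in range(len(s2)):
--         k = 0
--         m, n = i - 1, i + 1
--         while m >= 0 and n < len(s2) and s2[m] == s2[n]:
--             k += 1
--             m -= 1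
--             n += 1
--         p.append(k)
--     return p
-- ===== Notes on version B (the rewrite author's own statement) =====
-- stated objective: simpler
-- what changed: Replaced the Manacher centre/right-boundary state machine (mirror copy, boundary extension, centre updates) by a plain expand-around-centre scan: every centre of the separator-interleaved string is expanded independently, maintaining no cross-iteration state.
import Mathlib
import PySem

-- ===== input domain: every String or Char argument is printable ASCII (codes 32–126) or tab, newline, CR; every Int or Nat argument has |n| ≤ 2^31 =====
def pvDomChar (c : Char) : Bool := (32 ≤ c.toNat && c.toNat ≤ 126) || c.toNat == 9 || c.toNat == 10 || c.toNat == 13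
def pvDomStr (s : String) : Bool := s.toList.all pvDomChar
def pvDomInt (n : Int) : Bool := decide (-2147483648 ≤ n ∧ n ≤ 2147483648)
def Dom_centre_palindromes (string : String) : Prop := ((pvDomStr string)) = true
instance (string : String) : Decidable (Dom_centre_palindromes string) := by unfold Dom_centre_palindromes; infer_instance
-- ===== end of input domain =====

-- B replaces Manacher's centre/right-boundary state machine by an independent
-- expand-around-centre scan (simpler; not faster: O(n^2) worst case vs A's O(n)).

-- ===== PORT A =====
-- Both Pythons contain the identical inner loop
-- 'while m >= 0 and n < len(s2) and s2[m] == s2[n]: … m -= 1; n += 1';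
-- pvExt is its transliteration, returning the number of iterations (= the total
-- increment it adds to p[i] / k).  Used by both ports.
def pvExt (s2 : List Char) (m n : Int) : Int :=
  if h : 0 ≤ m ∧ n < (s2.length : Int) ∧ PySem.List.pyGet? s2 m = PySem.List.pyGet? s2 n then
    pvExt s2 (m - 1) (n + 1) + 1
  else 0
termination_by ((s2.length : Int) - n).toNat
decreasing_by obtain ⟨-, h2, -⟩ := h; omega

def centre_palindromes (string : String) : List Int :=
  if PySem.Str.len string == 0 then [] else
  let L := string.toList
  -- s2 = ["|"]*(2*len+1); for x in range(len(string)): s2[2*x+1] = string[x]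
  let s2 : List Char := (List.range L.length).foldl
    (fun s2 x => s2.set (2 * x + 1) (L.getD x '|')) (List.replicate (2 * L.length + 1) '|')
  let p0 : List Int := List.replicate s2.length 0
  -- state (p, c, r); m, n are set before every use of the while loop that can run,
  -- so they are iteration-local here (in the copy branch m = -1: the loop does not run)
  let res := (List.range' 1 (s2.length - 1)).foldl
    (fun (st : List Int × Int × Int) (i : Nat) =>
      let p := st.1
      let c := st.2.1
      let r := st.2.2
      let pi : Int :=
        if (i : Int) > r then
          0 + pvExt s2 ((i : Int) - 1) ((i : Int) + 1)
        else
          let i2 : Int := c * 2 - (i : Int)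
          if PySem.List.pyGetD p i2 0 < r - 1 - (i : Int) then
            PySem.List.pyGetD p i2 0 + pvExt s2 (-1) ((i : Int) + 1)
          else
            (r - (i : Int)) + pvExt s2 ((i : Int) * 2 - (r + 1)) (r + 1)
      let p' := p.set i pi
      if (i : Int) + pi > r then (p', (i : Int), (i : Int) + pi) else (p', c, r))
    (p0, 0, 0)
  res.1

-- ===== PORT B =====
def centre_palindromes_alt (string : String) : List Int :=
  if PySem.Str.len string == 0 then [] else
  let s2 : List Char := string.toList.foldl (fun s2 ch => s2 ++ [ch, '|']) ['|']
  (List.range s2.length).foldl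
    (fun (p : List Int) (i : Nat) => p ++ [pvExt s2 ((i : Int) - 1) ((i : Int) + 1)]) []

-- ===== PRECONDITION & SPEC =====
def Spec_centre_palindromes (string : String) (out : List Int) : Prop := out = centre_palindromes_alt string
instance (string : String) (out : List Int) : Decidable (Spec_centre_palindromes string out) := by unfold Spec_centre_palindromes; infer_instance

-- ===== CLAIM (what is proved, stated in full; the proofs are below) =====
def Claim_equal_centre_palindromes : Prop := ∀ (string : String), Dom_centre_palindromes string → Spec_centre_palindromes string (centre_palindromes string)

-- ===== LEMMAS AND PROOFS =====

-- the interleaved string both programs build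
def pvMid (L : List Char) : List Char := '|' :: L.flatMap (fun c => [c, '|'])

-- B's radius at centre i
def pvRad (s2 : List Char) (i : Nat) : Int := pvExt s2 ((i : Int) - 1) ((i : Int) + 1)

-- all offsets 1..k around centre i match, within bounds
def pvGood (s2 : List Char) (i k : Nat) : Prop :=
  k ≤ i ∧ i + k < s2.length ∧ ∀ j, 1 ≤ j → j ≤ k → s2[i - j]? = s2[i + j]?

-- offset k+1 does not extend (out of bounds or mismatch)
def pvBlocked (s2 : List Char) (i k : Nat) : Prop :=
  ¬ (k + 1 ≤ i ∧ i + (k + 1) < s2.length ∧ s2[i - (k + 1)]? = s2[i + (k + 1)]?)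

-- odd length and '|' at every even position
def pvSep (s2 : List Char) : Prop :=
  s2.length % 2 = 1 ∧ ∀ j, j < s2.length → j % 2 = 0 → s2[j]? = some '|'

theorem pvExt_unfold (s2 : List Char) (m n : Int) :
    pvExt s2 m n =
      if 0 ≤ m ∧ n < (s2.length : Int) ∧ PySem.List.pyGet? s2 m = PySem.List.pyGet? s2 n then
        pvExt s2 (m - 1) (n + 1) + 1
      else 0 := by
  rw [pvExt]; split <;> simp_all

theorem pvExt_nonneg (s2 : List Char) (m n : Int) : 0 ≤ pvExt s2 m n := by
  fun_induction pvExt s2 m n with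
  | case1 m n h ih => omega
  | case2 m n h => simp

-- Nat-indexed step, matching case
theorem pvExt_step (s2 : List Char) (i a : Nat) (h1 : a + 1 ≤ i) (h2 : i + (a + 1) < s2.length) :
    pvExt s2 ((i : Int) - a - 1) ((i : Int) + a + 1) =
      if s2[i - (a + 1)]? = s2[i + (a + 1)]? then
        pvExt s2 ((i : Int) - (a + 1) - 1) ((i : Int) + (a + 1) + 1) + 1
      else 0 := by
  rw [pvExt_unfold]
  have e1 : (i : Int) - a - 1 = ((i - (a + 1) : Nat) : Int) := by omega
  have e2 : (i : Int) + a + 1 = ((i + (a + 1) : Nat) : Int) := by omega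
  rw [e1, e2, PySem.List.pyGet?_natCast, PySem.List.pyGet?_natCast]
  have hc : (0 : Int) ≤ ((i - (a + 1) : Nat) : Int) ∧ ((i + (a + 1) : Nat) : Int) < (s2.length : Int) := by omega
  have e3 : ((i - (a + 1) : Nat) : Int) - 1 = (i : Int) - (a + 1) - 1 := by omega
  have e4 : ((i + (a + 1) : Nat) : Int) + 1 = (i : Int) + (a + 1) + 1 := by omega
  by_cases hm : s2[i - (a + 1)]? = s2[i + (a + 1)]?
  · rw [if_pos ⟨hc.1, hc.2, hm⟩, if_pos hm, e3, e4]
  · rw [if_neg (by tauto), if_neg hm]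

-- Nat-indexed step, blocked-by-bounds case
theorem pvExt_stop (s2 : List Char) (i a : Nat) (h : ¬ (a + 1 ≤ i ∧ i + (a + 1) < s2.length)) :
    pvExt s2 ((i : Int) - a - 1) ((i : Int) + a + 1) = 0 := by
  rw [pvExt_unfold]
  rw [if_neg]
  rintro ⟨hm, hn, -⟩
  exact h ⟨by omega, by omega⟩

-- peeling b matched offsets
theorem pvExt_shift (s2 : List Char) (i : Nat) :
    ∀ b a : Nat, a + b ≤ i → i + (a + b) < s2.length →
      (∀ j, a < j → j ≤ a + b → s2[i - j]? = s2[i + j]?) →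
      pvExt s2 ((i : Int) - a - 1) ((i : Int) + a + 1) =
        b + pvExt s2 ((i : Int) - (a + b) - 1) ((i : Int) + (a + b) + 1) := by
  intro b
  induction b with
  | zero =>
    intro a _ _ _
    push_cast
    ring_nf
  | succ b ih =>
    intro a hab hlen hm
    have step := pvExt_step s2 i a (by omega) (by omega)
    rw [if_pos (hm (a + 1) (by omega) (by omega))] at step
    have ih' := ih (a + 1) (by omega) (by omega) (fun j h1 h2 => hm j (by omega) (by omega))
    push_cast at step ih' ⊢
    rw [step, ih']
    ring_nf

-- the expansion yields a Good and Blocked radius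
theorem pvExt_grow (s2 : List Char) :
    ∀ d i a : Nat, s2.length - (i + a) ≤ d → pvGood s2 i a →
      pvGood s2 i (a + (pvExt s2 ((i : Int) - a - 1) ((i : Int) + a + 1)).toNat) ∧
      pvBlocked s2 i (a + (pvExt s2 ((i : Int) - a - 1) ((i : Int) + a + 1)).toNat) := by
  intro d
  induction d with
  | zero =>
    intro i a hd hg
    exact absurd hg.2.1 (by omega)
  | succ d ih =>
    intro i a hd hg
    by_cases hb : a + 1 ≤ i ∧ i + (a + 1) < s2.length
    · rw [pvExt_step s2 i a hb.1 hb.2]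
      by_cases hm : s2[i - (a + 1)]? = s2[i + (a + 1)]?
      · rw [if_pos hm]
        have hn := pvExt_nonneg s2 ((i : Int) - (a + 1) - 1) ((i : Int) + (a + 1) + 1)
        have e : a + (pvExt s2 ((i : Int) - (a + 1) - 1) ((i : Int) + (a + 1) + 1) + 1).toNat =
            (a + 1) + (pvExt s2 ((i : Int) - (a + 1) - 1) ((i : Int) + (a + 1) + 1)).toNat := by
          omega
        rw [e]
        refine ih i (a + 1) (by omega) ⟨hb.1, hb.2, fun j h1 h2 => ?_⟩
        rcases Nat.lt_or_ge j (a + 1) with h | h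
        · exact hg.2.2 j h1 (by omega)
        · have : j = a + 1 := by omega
          rw [this]; exact hm
      · rw [if_neg hm]
        refine ⟨by simpa using hg, ?_⟩
        rintro ⟨-, -, heq⟩
        exact hm (by simpa using heq)
    · rw [pvExt_stop s2 i a hb]
      refine ⟨by simpa using hg, ?_⟩
      rintro ⟨h1, h2, -⟩
      exact hb ⟨h1, by simpa using h2⟩

theorem pvRad_good (s2 : List Char) (i : Nat) (hi : i < s2.length) :
    pvGood s2 i (pvRad s2 i).toNat := by
  have h := (pvExt_grow s2 s2.length i 0 (by omega) ⟨by omega, by omega, by omega⟩).1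
  norm_num at h
  simpa [pvRad] using h

theorem pvRad_blocked (s2 : List Char) (i : Nat) (hi : i < s2.length) :
    pvBlocked s2 i (pvRad s2 i).toNat := by
  have h := (pvExt_grow s2 s2.length i 0 (by omega) ⟨by omega, by omega, by omega⟩).2
  norm_num at h
  simpa [pvRad] using h

theorem pvGood_le (s2 : List Char) (i k k' : Nat) (_hg : pvGood s2 i k) (hb : pvBlocked s2 i k)
    (hg' : pvGood s2 i k') : k' ≤ k := by
  by_contra hlt
  obtain ⟨h1', h2', h3'⟩ := hg'
  exact hb ⟨by omega, by omega, h3' (k + 1) (by omega) (by omega)⟩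

theorem pvRad_eq (s2 : List Char) (i k : Nat) (hi : i < s2.length)
    (hg : pvGood s2 i k) (hb : pvBlocked s2 i k) : pvRad s2 i = k := by
  have hgK := pvRad_good s2 i hi
  have hbK := pvRad_blocked s2 i hi
  have h1 := pvGood_le s2 i k _ hg hb hgK
  have h2 := pvGood_le s2 i _ k hgK hbK hg
  have hn := pvExt_nonneg s2 ((i : Int) - 1) ((i : Int) + 1)
  simp only [pvRad] at *
  omega

-- parity: i + rad i is even on a separator string
theorem pvRad_parity (s2 : List Char) (hs : pvSep s2) (i : Nat) (hi : i < s2.length) :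
    (i + (pvRad s2 i).toNat) % 2 = 0 := by
  obtain ⟨hsl, hsep⟩ := hs
  obtain ⟨h1, h2, -⟩ := pvRad_good s2 i hi
  have hb := pvRad_blocked s2 i hi
  by_contra hodd
  apply hb
  refine ⟨by omega, by omega, ?_⟩
  rw [hsep (i - ((pvRad s2 i).toNat + 1)) (by omega) (by omega),
      hsep (i + ((pvRad s2 i).toNat + 1)) (by omega) (by omega)]

-- mirror: inside the palindrome around C, matches at i transfer to/from i2 = 2C - i
theorem pvMirror (s2 : List Char) (C i k : Nat) (hC : C < i)
    (hik : i + k ≤ C + (pvRad s2 C).toNat) (hCl : C < s2.length) (hk : 1 ≤ k) :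
    (s2[i - k]? = s2[i + k]?) ↔ (s2[2 * C - i - k]? = s2[2 * C - i + k]?) := by
  obtain ⟨hRC, hRlen, hmC⟩ := pvRad_good s2 C hCl
  have hki : k + 2 ≤ i := by omega
  have eq1 : s2[i + k]? = s2[2 * C - i - k]? := by
    have h := hmC (i + k - C) (by omega) (by omega)
    rw [show C - (i + k - C) = 2 * C - i - k by omega,
        show C + (i + k - C) = i + k by omega] at h
    exact h.symm
  have eq2 : s2[i - k]? = s2[2 * C - i + k]? := by
    rcases Nat.lt_trichotomy (i - k) C with h | h | h
    · have hj := hmC (C - (i - k)) (by omega) (by omega)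
      rw [show C - (C - (i - k)) = i - k by omega,
          show C + (C - (i - k)) = 2 * C - i + k by omega] at hj
      exact hj
    · rw [h, show 2 * C - i + k = C by omega]
    · have hj := hmC ((i - k) - C) (by omega) (by omega)
      rw [show C - ((i - k) - C) = 2 * C - i + k by omega,
          show C + ((i - k) - C) = i - k by omega] at hj
      exact hj.symm
  rw [eq1, eq2]
  exact eq_comm

-- copy branch: rad i = rad i2 when rad i2 + 2 ≤ r - i
theorem pvCopy (s2 : List Char) (C i : Nat) (hC : C < i)
    (hCl : C < s2.length)
    (hlt : ((pvRad s2 (2 * C - i)).toNat : Int) < (C : Int) + (pvRad s2 C).toNat - 1 - i)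
    (hir : i ≤ C + (pvRad s2 C).toNat) :
    pvRad s2 i = pvRad s2 (2 * C - i) := by
  obtain ⟨hRC, hRlen, -⟩ := pvRad_good s2 C hCl
  have hnC : (0 : Int) ≤ pvRad s2 C := pvExt_nonneg s2 _ _
  have hn2 : (0 : Int) ≤ pvRad s2 (2 * C - i) := pvExt_nonneg s2 _ _
  have hi2l : 2 * C - i < s2.length := by omega
  have hil : i < s2.length := by omega
  obtain ⟨hk2i, hk2l, hm2⟩ := pvRad_good s2 (2 * C - i) hi2l
  have hb2 := pvRad_blocked s2 (2 * C - i) hi2l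
  have hk2r : (pvRad s2 (2 * C - i)).toNat + 2 ≤ C + (pvRad s2 C).toNat - i := by omega
  have hgi : pvGood s2 i (pvRad s2 (2 * C - i)).toNat := by
    refine ⟨by omega, by omega, fun j h1 h2 => ?_⟩
    exact (pvMirror s2 C i j hC (by omega) hCl h1).mpr (hm2 j h1 h2)
  have hbi : pvBlocked s2 i (pvRad s2 (2 * C - i)).toNat := by
    rintro ⟨hb1', hb2', heq⟩
    apply hb2
    refine ⟨by omega, by omega, ?_⟩
    exact (pvMirror s2 C i ((pvRad s2 (2 * C - i)).toNat + 1) hC (by omega) hCl (by omega)).mp heq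
  have := pvRad_eq s2 i _ hil hgi hbi
  omega

-- extend branch: all offsets up to r - i match around i
theorem pvElse (s2 : List Char) (hs : pvSep s2) (C i : Nat) (hC : C < i)
    (hCl : C < s2.length)
    (hge : ¬ ((pvRad s2 (2 * C - i)).toNat : Int) < (C : Int) + (pvRad s2 C).toNat - 1 - i)
    (hir : i ≤ C + (pvRad s2 C).toNat) :
    pvGood s2 i (C + (pvRad s2 C).toNat - i) := by
  obtain ⟨hRC, hRlen, -⟩ := pvRad_good s2 C hCl
  have hnC : (0 : Int) ≤ pvRad s2 C := pvExt_nonneg s2 _ _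
  rcases Nat.eq_or_lt_of_le hir with heq | hlt
  · refine ⟨by omega, by omega, fun j h1 h2 => by omega⟩
  · have hi2l : 2 * C - i < s2.length := by omega
    have hn2 : (0 : Int) ≤ pvRad s2 (2 * C - i) := pvExt_nonneg s2 _ _
    obtain ⟨hk2i, hk2l, hm2⟩ := pvRad_good s2 (2 * C - i) hi2l
    have hparC := pvRad_parity s2 hs C hCl
    have hpar2 := pvRad_parity s2 hs (2 * C - i) hi2l
    have hge' : C + (pvRad s2 C).toNat - i ≤ (pvRad s2 (2 * C - i)).toNat := by omega
    refine ⟨by omega, by omega, fun j h1 h2 => ?_⟩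
    exact (pvMirror s2 C i j hC (by omega) hCl h1).mpr (hm2 j h1 (by omega))

theorem pvMid_length (L : List Char) : (pvMid L).length = 2 * L.length + 1 := by
  induction L with
  | nil => rfl
  | cons a L ih => simp [pvMid] at ih ⊢; omega

theorem pvMid_sep (L : List Char) : pvSep (pvMid L) := by
  refine ⟨by rw [pvMid_length]; omega, ?_⟩
  induction L with
  | nil =>
    intro j hj _
    have hj0 : j = 0 := by simp [pvMid] at hj; omega
    subst hj0; rfl
  | cons a L ih =>
    intro j hj hpar
    have hcons : pvMid (a :: L) = '|' :: a :: pvMid L := by simp [pvMid]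
    rw [hcons] at hj ⊢
    match j, hpar with
    | 0, _ => rfl
    | (j + 2), hpar =>
      have hlen : (pvMid (a :: L)).length = (pvMid L).length + 2 := by
        rw [pvMid_length, pvMid_length]; simp; omega
      simp only [List.getElem?_cons_succ]
      exact ih j (by rw [hcons] at hlen; simp at hj ⊢; omega) (by omega)

theorem pvMid_append_singleton (M : List Char) (a : Char) :
    pvMid (M ++ [a]) = pvMid M ++ [a, '|'] := by
  simp [pvMid]

theorem pvSetFold (L : List Char) : ∀ k, k ≤ L.length →
    (List.range k).foldl (fun s2 x => s2.set (2 * x + 1) (L.getD x '|'))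
      (List.replicate (2 * L.length + 1) '|')
    = pvMid (L.take k) ++ List.replicate (2 * (L.length - k)) '|' := by
  intro k
  induction k with
  | zero =>
    intro _
    simp [pvMid, List.replicate_succ]
  | succ k ih =>
    intro hk
    rw [List.range_succ, List.foldl_append, ih (by omega)]
    simp only [List.foldl_cons, List.foldl_nil]
    have htk : L.take (k + 1) = L.take k ++ [L[k]] := by
      rw [List.take_add_one]
      simp [List.getElem?_eq_getElem (by omega : k < L.length)]
    have hgd : L.getD k '|' = L[k] := List.getD_eq_getElem L '|' (by omega)
    have hlen : (pvMid (L.take k)).length = 2 * k + 1 := by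
      rw [pvMid_length, List.length_take]; omega
    rw [htk, pvMid_append_singleton, hgd]
    rw [List.set_append_right _ _ (by omega), hlen]
    have e1 : 2 * k + 1 - (2 * k + 1) = 0 := by omega
    have e2 : 2 * (L.length - k) = (2 * (L.length - (k + 1)) + 1) + 1 := by omega
    rw [e1, e2, List.replicate_succ, List.set_cons_zero, List.replicate_succ]
    simp

-- s2 built by A (replicate + set loop) is pvMid
theorem pvS2A (L : List Char) :
    (List.range L.length).foldl (fun s2 x => s2.set (2 * x + 1) (L.getD x '|'))
      (List.replicate (2 * L.length + 1) '|') = pvMid L := by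
  have h := pvSetFold L L.length (le_refl _)
  simpa using h

-- s2 built by B (append loop) is pvMid
theorem pvS2B (L : List Char) :
    L.foldl (fun s2 ch => s2 ++ [ch, '|']) ['|'] = pvMid L := by
  rw [PySem.List.foldl_append_eq_flatMap]
  rfl

-- the loop invariant of A's main fold
def pvInv (s2 : List Char) (i : Nat) (st : List Int × Int × Int) : Prop :=
  st.1.length = s2.length ∧
  (∀ j, j < i → st.1[j]? = some (pvRad s2 j)) ∧
  (∀ j, i ≤ j → j < s2.length → st.1[j]? = some 0) ∧
  ∃ C : Nat, st.2.1 = (C : Int) ∧ st.2.2 = ((C + (pvRad s2 C).toNat : Nat) : Int) ∧ C < i ∧ C < s2.length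

-- A's loop body, as it appears in the port (definitionally equal to the fold function there)
def pvBody (s2 : List Char) (st : List Int × Int × Int) (i : Nat) : List Int × Int × Int :=
  let p := st.1
  let c := st.2.1
  let r := st.2.2
  let pi : Int :=
    if (i : Int) > r then
      0 + pvExt s2 ((i : Int) - 1) ((i : Int) + 1)
    else
      let i2 : Int := c * 2 - (i : Int)
      if PySem.List.pyGetD p i2 0 < r - 1 - (i : Int) then
        PySem.List.pyGetD p i2 0 + pvExt s2 (-1) ((i : Int) + 1)
      else
        (r - (i : Int)) + pvExt s2 ((i : Int) * 2 - (r + 1)) (r + 1)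
  let p' := p.set i pi
  if (i : Int) + pi > r then (p', (i : Int), (i : Int) + pi) else (p', c, r)

theorem pvStepOne (s2 : List Char) (hs : pvSep s2) (i : Nat) (st : List Int × Int × Int)
    (h1i : 1 ≤ i) (hil : i < s2.length) (hInv : pvInv s2 i st) :
    pvInv s2 (i + 1) (pvBody s2 st i) := by
  obtain ⟨hplen, hpD, hpZ, C, hc, hr, hCi, hCl⟩ := hInv
  have hnC : (0 : Int) ≤ pvRad s2 C := pvExt_nonneg s2 _ _
  have hni : (0 : Int) ≤ pvRad s2 i := pvExt_nonneg s2 _ _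
  obtain ⟨hRC, hRlen, -⟩ := pvRad_good s2 C hCl
  -- the computed pi is the true radius at i
  have hpi : pvBody s2 st i =
      (st.1.set i (pvRad s2 i),
        if (i : Int) + pvRad s2 i > st.2.2 then ((i : Int), (i : Int) + pvRad s2 i)
        else (st.2.1, st.2.2)) := by
    have hval : (if (i : Int) > st.2.2 then 0 + pvExt s2 ((i : Int) - 1) ((i : Int) + 1)
        else if PySem.List.pyGetD st.1 (st.2.1 * 2 - (i : Int)) 0 < st.2.2 - 1 - (i : Int) then
          PySem.List.pyGetD st.1 (st.2.1 * 2 - (i : Int)) 0 + pvExt s2 (-1) ((i : Int) + 1)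
        else (st.2.2 - (i : Int)) + pvExt s2 ((i : Int) * 2 - (st.2.2 + 1)) (st.2.2 + 1))
        = pvRad s2 i := by
      by_cases hgt : (i : Int) > st.2.2
      · rw [if_pos hgt]
        simp [pvRad]
      · rw [if_neg hgt]
        rw [hr] at hgt ⊢
        have hir : i ≤ C + (pvRad s2 C).toNat := by omega
        have hi2 : st.2.1 * 2 - (i : Int) = ((2 * C - i : Nat) : Int) := by rw [hc]; omega
        have hi2lt : 2 * C - i < i := by omega
        have hd : PySem.List.pyGetD st.1 (st.2.1 * 2 - (i : Int)) 0 = pvRad s2 (2 * C - i) := by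
          rw [hi2, PySem.List.pyGetD_natCast, List.getD_eq_getElem?_getD, hpD _ hi2lt]
          rfl
        have hn2 : (0 : Int) ≤ pvRad s2 (2 * C - i) := pvExt_nonneg s2 _ _
        rw [hd]
        by_cases hlt : pvRad s2 (2 * C - i) < ((C + (pvRad s2 C).toNat : Nat) : Int) - 1 - (i : Int)
        · rw [if_pos hlt, pvExt_unfold]
          norm_num
          exact (pvCopy s2 C i hCi hCl (by omega) hir).symm
        · rw [if_neg hlt]
          have hg := pvElse s2 hs C i hCi hCl (by omega) hir
          obtain ⟨hg1, hg2, hg3⟩ := hg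
          have shift := pvExt_shift s2 i (C + (pvRad s2 C).toNat - i) 0 (by omega) (by omega)
            (fun j hj1 hj2 => hg3 j (by omega) (by omega))
          norm_num at shift
          have e1 : (i : Int) * 2 - (((C + (pvRad s2 C).toNat : Nat) : Int) + 1)
              = (i : Int) - ((C + (pvRad s2 C).toNat - i : Nat) : Int) - 1 := by omega
          have e2 : ((C + (pvRad s2 C).toNat : Nat) : Int) + 1
              = (i : Int) + ((C + (pvRad s2 C).toNat - i : Nat) : Int) + 1 := by omega
          have hradi : pvRad s2 i = pvExt s2 ((i : Int) - 1) ((i : Int) + 1) := rfl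
          rw [e1, e2, hradi, shift]
          omega
    show (let p := st.1
          let c := st.2.1
          let r := st.2.2
          let pi : Int :=
            if (i : Int) > r then
              0 + pvExt s2 ((i : Int) - 1) ((i : Int) + 1)
            else
              let i2 : Int := c * 2 - (i : Int)
              if PySem.List.pyGetD p i2 0 < r - 1 - (i : Int) then
                PySem.List.pyGetD p i2 0 + pvExt s2 (-1) ((i : Int) + 1)
              else
                (r - (i : Int)) + pvExt s2 ((i : Int) * 2 - (r + 1)) (r + 1)
          let p' := p.set i pi
          if (i : Int) + pi > r then (p', (i : Int), (i : Int) + pi) else (p', c, r)) = _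
    dsimp only
    rw [hval]
    split <;> rfl
  rw [hpi]
  refine ⟨by simpa using hplen, ?_, ?_, ?_⟩
  · intro j hj
    rcases Nat.lt_or_ge j i with h | h
    · rw [List.getElem?_set_ne (by omega)]
      exact hpD j h
    · have : j = i := by omega
      subst this
      rw [List.getElem?_set_self (by omega)]
  · intro j hj hjl
    rw [List.getElem?_set_ne (by omega)]
    exact hpZ j (by omega) hjl
  · by_cases hbig : (i : Int) + pvRad s2 i > st.2.2
    · rw [if_pos hbig]
      exact ⟨i, rfl, by simp; omega, by omega, hil⟩
    · rw [if_neg hbig]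
      exact ⟨C, hc, hr, by omega, hCl⟩

theorem pvStep (s2 : List Char) (hs : pvSep s2) :
    ∀ (cnt start : Nat) (st : List Int × Int × Int), 1 ≤ start → start + cnt ≤ s2.length →
      pvInv s2 start st →
      pvInv s2 (start + cnt) ((List.range' start cnt).foldl (pvBody s2) st) := by
  intro cnt
  induction cnt with
  | zero => intro start st _ _ h; simpa using h
  | succ cnt ih =>
    intro start st hstart hcnt hInv
    rw [List.range'_succ, List.foldl_cons]
    have h1 := pvStepOne s2 hs start st hstart (by omega) hInv
    have h2 := ih (start + 1) _ (by omega) (by omega) h1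
    rw [show start + (cnt + 1) = start + 1 + cnt by omega]
    exact h2

-- ===== VERDICT (by name: the statement is the Claim_ definition above) =====
theorem centre_palindromes_spec : Claim_equal_centre_palindromes := by
  unfold Claim_equal_centre_palindromes Spec_centre_palindromes
  intro s _
  unfold centre_palindromes centre_palindromes_alt
  by_cases h0 : (PySem.Str.len s == 0) = true
  · rw [if_pos h0, if_pos h0]
  · rw [if_neg h0, if_neg h0]
    dsimp only
    have hL : 1 ≤ s.toList.length := by
      rcases Nat.eq_zero_or_pos s.toList.length with h | h
      · exact absurd (by simp [PySem.Str.len_eq, h] : (PySem.Str.len s == 0) = true) h0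
      · exact h
    rw [pvS2A s.toList, pvS2B s.toList]
    have hsep := pvMid_sep s.toList
    have hlen2 := pvMid_length s.toList
    have hrad0 : pvRad (pvMid s.toList) 0 = 0 := by
      rw [pvRad, pvExt_unfold]
      norm_num
    have hInv1 : pvInv (pvMid s.toList) 1 (List.replicate (pvMid s.toList).length 0, 0, 0) := by
      refine ⟨by simp, ?_, ?_, 0, rfl, by simp [hrad0], by omega, by omega⟩
      · intro j hj
        have hj0 : j = 0 := by omega
        subst hj0
        rw [hrad0]
        simp [pvMid_length]
      · intro j _ hjl
        simp [hjl]
    have hstep := pvStep (pvMid s.toList) hsep ((pvMid s.toList).length - 1) 1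
      (List.replicate (pvMid s.toList).length 0, 0, 0) (by omega) (by omega) hInv1
    rw [show 1 + ((pvMid s.toList).length - 1) = (pvMid s.toList).length by omega] at hstep
    obtain ⟨hlenp, hvals, -, -⟩ := hstep
    rw [PySem.List.foldl_append_singleton_eq_map, List.nil_append]
    unfold pvBody at hlenp hvals
    dsimp only at hlenp hvals
    apply List.ext_getElem
    · rw [hlenp, List.length_map, List.length_range]
    · intro j hj1 hj2
      have hv := hvals j (by rwa [hlenp] at hj1)
      rw [List.getElem?_eq_getElem hj1, Option.some_inj] at hv
      rw [hv]
      simp only [List.getElem_map, List.getElem_range]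
      rfl
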